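-- pv_equiv track=rewrite | github.com/itsronathan/ai-job-matcher | job_matcher.py | extract_qualification_section
-- ===== SOURCE A (Python) =====
-- def extract_qualification_section(text):
--     """Return text from the most relevant qualifications/requirements section.
--
--     The algorithm scans for a heading using a prioritized list: we want the "Minimum
--     Knowledge" block if present, otherwise fall back to "Required Qualifications",
--     "Qualifications", then "Key Attributes". Once the start is located it grabs all
--     following non-blank lines until the next heading or an empty line after content.
--     """
--     lines = text.splitlines()
--     priority = ['minimum knowledge', 'required qualifications',
--                 'required skills', 'qualifications', 'key attributes']
--
--     start_idx = None
--     for pat in priority: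
--         for i, line in enumerate(lines):
--             if line.strip().lower().startswith(pat):
--                 # begin after this heading line
--                 start_idx = i + 1
--                 break
--         if start_idx is not None:
--             break
--
--     if start_idx is None:
--         return ''
--
--     section_lines = []
--     for line in lines[start_idx:]:
--         lower = line.strip().lower()
--         if lower == '':
--             # stop if we've already collected some content
--             if section_lines:
--                 break
--             else:
--                 continue
--         if any(lower.startswith(pat) for pat in priority):
--             break
--         section_lines.append(line)
--
--     return ' '.join(section_lines)
-- ===== SOURCE B (Python) =====
-- def extract_qualification_section(text):
--     """Return text from the most relevant qualifications/requirements section."""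
--     lines = text.splitlines()
--     priority = ['minimum knowledge', 'required qualifications',
--                 'required skills', 'qualifications', 'key attributes']
--
--     # Single pass over the lines: record, per pattern, the index of the FIRST
--     # line whose stripped-lowered text starts with it.
--     first_hit = {}
--     for i, line in enumerate(lines):
--         low = line.strip().lower()
--         for pat in priority:
--             if pat not in first_hit and low.startswith(pat):
--                 first_hit[pat] = i
--
--     # Select strictly by priority order.
--     start_idx = None
--     for pat in priority:
--         if pat in first_hit:
--             start_idx = first_hit[pat] + 1
--             break
--
--     if start_idx is None:
--         return ''
--
--     section_lines = []
--     for line in lines[start_idx:]: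
--         lower = line.strip().lower()
--         if lower == '':
--             if section_lines:
--                 break
--             continue
--         if any(lower.startswith(pat) for pat in priority):
--             break
--         section_lines.append(line)
--
--     return ' '.join(section_lines)
-- ===== Notes on version B (the rewrite author's own statement) =====
-- stated objective: alternative
-- what changed: Heading location is done in one forward pass over the lines that records the first matching line index per pattern in a dict, then a lookup over the priority list picks the hit, replacing A's priority-by-priority rescans of the whole line list; the collection loop is unchanged.
import Mathlib
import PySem

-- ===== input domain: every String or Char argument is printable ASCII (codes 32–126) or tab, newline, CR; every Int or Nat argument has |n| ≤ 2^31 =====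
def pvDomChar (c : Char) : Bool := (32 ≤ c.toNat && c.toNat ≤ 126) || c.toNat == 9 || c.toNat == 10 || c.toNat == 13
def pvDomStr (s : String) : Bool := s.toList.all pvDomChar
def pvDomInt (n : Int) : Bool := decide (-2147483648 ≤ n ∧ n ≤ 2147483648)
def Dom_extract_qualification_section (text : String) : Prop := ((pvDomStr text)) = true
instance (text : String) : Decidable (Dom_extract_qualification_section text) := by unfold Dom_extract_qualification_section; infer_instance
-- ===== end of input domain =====

-- B replaces A's priority-by-priority rescans of the line list with one pass recording
-- the first matching line index per pattern in a dict, then a priority-order lookup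
-- (objective: alternative structure, same collection phase).

-- shared: the priority list and the collection loop, identical code in both Pythons
def pvPriority : List String :=
  ["minimum knowledge", "required qualifications", "required skills",
   "qualifications", "key attributes"]

def pvCollect (lines : List String) (acc : List String) : List String :=
  match lines with
  | [] => acc
  | line :: rest =>
    let lower := PySem.Str.lower (PySem.Str.strip line)
    if lower = "" then
      if acc.isEmpty then pvCollect rest acc else acc
    else if pvPriority.any (fun pat => PySem.Str.startswith lower pat) then acc
    else pvCollect rest (acc ++ [line])

-- ===== PORT A =====
-- inner 'for i, line in enumerate(lines): … break'
def pvAFindLoop (pairs : List (Int × String)) (pat : String) : Option Int :=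
  match pairs with
  | [] => none
  | (i, line) :: rest =>
    if PySem.Str.startswith (PySem.Str.lower (PySem.Str.strip line)) pat
    then some (i + 1) else pvAFindLoop rest pat

-- outer 'for pat in priority: … if start_idx is not None: break'
def pvAStart (lines : List String) : Option Int :=
  pvPriority.foldl (fun acc pat =>
    match acc with
    | some _ => acc
    | none => pvAFindLoop (PySem.List.enumerate lines) pat) none

def extract_qualification_section (text : String) : String :=
  let lines := PySem.Str.splitlines text
  match pvAStart lines with
  | none => ""
  | some start =>
      PySem.Str.join " " (pvCollect (PySem.List.slice lines (some start) none) [])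

-- ===== PORT B =====
-- one pass over the lines: first matching index per pattern, kept in a dict
def pvBHits (lines : List String) : PySem.Dict String Int :=
  (PySem.List.enumerate lines).foldl (fun d p =>
    let low := PySem.Str.lower (PySem.Str.strip p.2)
    pvPriority.foldl (fun d pat =>
      if (!d.contains pat) && PySem.Str.startswith low pat then d.insert pat p.1 else d) d)
    PySem.Dict.empty

-- 'for pat in priority: if pat in first_hit: start_idx = first_hit[pat] + 1; break'
def pvBStart (lines : List String) : Option Int :=
  pvPriority.foldl (fun acc pat =>
    match acc with
    | some _ => acc
    | none =>
      match (pvBHits lines).get? pat with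
      | some i => some (i + 1)
      | none => none) none

def extract_qualification_section_alt (text : String) : String :=
  let lines := PySem.Str.splitlines text
  match pvBStart lines with
  | none => ""
  | some start =>
      PySem.Str.join " " (pvCollect (PySem.List.slice lines (some start) none) [])

-- ===== PRECONDITION & SPEC =====
def Spec_extract_qualification_section (text : String) (out : String) : Prop := out = extract_qualification_section_alt text
instance (text : String) (out : String) : Decidable (Spec_extract_qualification_section text out) := by unfold Spec_extract_qualification_section; infer_instance

-- ===== CLAIM (what is proved, stated in full; the proofs are below) =====
def Claim_equal_extract_qualification_section : Prop := ∀ (text : String), Dom_extract_qualification_section text → Spec_extract_qualification_section text (extract_qualification_section text)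

-- ===== LEMMAS AND PROOFS =====

-- first index (if any) whose line satisfies m (· pat), over an enumerated list
def pvFirstIdx (pairs : List (Int × String)) (m : String → String → Bool) (pat : String) : Option Int :=
  (pairs.find? (fun p => m p.2 pat)).map (·.1)

theorem pvAFindLoop_eq (pairs : List (Int × String)) (pat : String) :
    pvAFindLoop pairs pat
      = (pvFirstIdx pairs (fun line pat => PySem.Str.startswith (PySem.Str.lower (PySem.Str.strip line)) pat) pat).map (· + 1) := by
  induction pairs with
  | nil => rfl
  | cons p rest ih =>
    obtain ⟨i, line⟩ := p
    cases h : PySem.Chars.startswith (PySem.Chars.lower (PySem.Chars.strip line.toList)) pat.toList with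
    | true => simp [pvAFindLoop, pvFirstIdx, List.find?, h]
    | false => simp [pvAFindLoop, pvFirstIdx, List.find?, h, ih]

-- the inner fold over the priority list, for one line (f pat = does this line match pat)
theorem pvInnerFold_get? (ps : List String) (d : PySem.Dict String Int)
    (f : String → Bool) (i : Int) (pat : String) :
    ((ps.foldl (fun d pat => if (!d.contains pat) && f pat then d.insert pat i else d) d).get? pat)
      = if pat ∈ ps ∧ d.get? pat = none ∧ f pat then some i else d.get? pat := by
  induction ps generalizing d with
  | nil => simp
  | cons q rest ih =>
    simp only [List.foldl_cons]
    rw [ih]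
    have hc : d.contains q = (d.get? q).isSome := PySem.Dict.contains_eq_isSome_get? d q
    cases hcond : ((!d.contains q) && f q) with
    | false =>
      simp only [Bool.false_eq_true, if_false]
      simp only [Bool.and_eq_false_iff, Bool.not_eq_false', hc] at hcond
      split_ifs with h1 h2 h2 <;> first
      | rfl
      | · exact absurd ⟨List.mem_cons_of_mem q h1.1, h1.2⟩ h2
      | · rcases h2 with ⟨hmem, hn, hf⟩
          rcases List.mem_cons.mp hmem with hq | hq
          · subst hq
            rcases hcond with hco | hco
            · rw [hn] at hco; simp at hco
            · rw [hco] at hf; simp at hf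
          · exact absurd ⟨hq, hn, hf⟩ h1
    | true =>
      simp only [if_true]
      simp only [Bool.and_eq_true, Bool.not_eq_true', hc, Option.isSome_eq_false_iff,
        Option.isNone_iff_eq_none] at hcond
      obtain ⟨hqnone, hfq⟩ := hcond
      rw [PySem.Dict.get?_insert]
      by_cases hq : pat = q
      · subst hq
        simp [hqnone, hfq, List.mem_cons]
      · simp only [if_neg hq]
        simp [List.mem_cons, hq]

-- the outer one-pass fold: dict lookup = first matching index, for priority patterns
theorem pvBHitsAux_get? (pairs : List (Int × String)) (d : PySem.Dict String Int)
    (m : String → String → Bool) (pat : String) (hpat : pat ∈ pvPriority) :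
    ((pairs.foldl (fun d p =>
        pvPriority.foldl (fun d pat =>
          if (!d.contains pat) && m p.2 pat then d.insert pat p.1 else d) d) d).get? pat)
      = (d.get? pat).or (pvFirstIdx pairs m pat) := by
  induction pairs generalizing d with
  | nil => simp [pvFirstIdx]
  | cons p rest ih =>
    obtain ⟨i, line⟩ := p
    simp only [List.foldl_cons]
    rw [ih, pvInnerFold_get? pvPriority d (fun pat => m line pat) i pat]
    by_cases hn : d.get? pat = none
    · cases hm : m line pat with
      | true => simp [hpat, hn, hm, pvFirstIdx, List.find?, Option.or]
      | false => simp [hn, hm, pvFirstIdx, List.find?, Option.or]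
    · cases h : d.get? pat with
      | none => exact absurd h hn
      | some v => simp [Option.or]

theorem pvBHits_get? (lines : List String) (pat : String) (hpat : pat ∈ pvPriority) :
    (pvBHits lines).get? pat
      = pvFirstIdx (PySem.List.enumerate lines)
          (fun line pat => PySem.Str.startswith (PySem.Str.lower (PySem.Str.strip line)) pat) pat := by
  unfold pvBHits
  rw [pvBHitsAux_get? (PySem.List.enumerate lines) PySem.Dict.empty
        (fun line pat => PySem.Str.startswith (PySem.Str.lower (PySem.Str.strip line)) pat) pat hpat]
  simp [Option.or]

theorem pvStart_eq (lines : List String) : pvBStart lines = pvAStart lines := by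
  unfold pvBStart pvAStart
  apply PySem.List.foldl_congr_mem
  intro acc pat hpat
  cases acc with
  | some v => rfl
  | none =>
    simp only
    rw [pvBHits_get? lines pat hpat, pvAFindLoop_eq]
    cases pvFirstIdx (PySem.List.enumerate lines)
        (fun line pat => PySem.Str.startswith (PySem.Str.lower (PySem.Str.strip line)) pat) pat with
    | none => rfl
    | some i => rfl

-- ===== VERDICT (by name: the statement is the Claim_ definition above) =====
theorem extract_qualification_section_spec : Claim_equal_extract_qualification_section := by
  intro text _
  unfold Spec_extract_qualification_section
  simp only [extract_qualification_section, extract_qualification_section_alt, pvStart_eq]
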